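-- pv_equiv track=rewrite | github.com/JulianKnodt/hackprincetonSpring2018 | classifications.py | extract_classifications
-- ===== SOURCE A (Python) =====
-- def extract_classifications(output_concat_phrases):
--   result = []
--   for phrase in output_concat_phrases:
--     sum = 0
--     for i, y in enumerate(phrase['classifications']):
--       sum += (y << i)
--     result += [sum]
--   return result
-- ===== SOURCE B (Python) =====
-- def extract_classifications(output_concat_phrases):
--   # Divide and conquer: value(ys) = value(lo) + (value(hi) << len(lo)),
--   # correct because the little-endian weighted sum splits additively at any cut.
--   def value(ys):
--     n = len(ys)
--     if n == 0:
--       return 0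
--     if n == 1:
--       return ys[0]
--     k = n // 2
--     return value(ys[:k]) + (value(ys[k:]) << k)
--   return [value(p['classifications']) for p in output_concat_phrases]
-- ===== Notes on version B (the rewrite author's own statement) =====
-- stated objective: alternative
-- what changed: Replaces the linear enumerate-and-shift accumulation by a recursive divide-and-conquer: the classification list is split in half, each half valued recursively, and the halves combined as lo + (hi << len(lo)); the outer accumulator loop becomes a list comprehension.
import Mathlib
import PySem

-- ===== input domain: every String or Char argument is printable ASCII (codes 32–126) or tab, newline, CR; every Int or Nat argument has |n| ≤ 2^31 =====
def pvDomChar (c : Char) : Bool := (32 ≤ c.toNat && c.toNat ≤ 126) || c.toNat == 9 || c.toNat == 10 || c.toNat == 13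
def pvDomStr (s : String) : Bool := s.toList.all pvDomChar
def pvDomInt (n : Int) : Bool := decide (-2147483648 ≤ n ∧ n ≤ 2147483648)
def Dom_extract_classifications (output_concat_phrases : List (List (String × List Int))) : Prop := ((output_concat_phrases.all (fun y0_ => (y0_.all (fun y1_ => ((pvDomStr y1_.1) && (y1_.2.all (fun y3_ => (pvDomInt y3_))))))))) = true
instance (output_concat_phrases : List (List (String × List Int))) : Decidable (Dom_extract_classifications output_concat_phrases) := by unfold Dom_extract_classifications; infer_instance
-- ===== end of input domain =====

-- B replaces A's linear enumerate-and-shift accumulation by a recursive divide-and-conquer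
-- valuation of each classification list (split in half, combine as lo + hi <<< k), and the
-- outer accumulator loop by a map (alternative decomposition, same cost).


-- ===== PORT A =====
-- phrase['classifications'] raises KeyError when absent; Pre_ excludes that, the port totalizes with getD [].
def extract_classifications (output_concat_phrases : List (List (String × List Int))) : List Int :=
  output_concat_phrases.foldl
    (fun result phrase =>
      result ++ [((PySem.List.enumerate (((PySem.Dict.mk phrase).get? "classifications").getD []) 0).foldl
        (fun s p => s + (p.2 <<< p.1.toNat)) 0)])
    []

-- ===== PORT B =====
-- ys[:k] / ys[k:] with 0 ≤ k ≤ len ys are exactly List.take k / List.drop k.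
def ec_value (l : List Int) : Int :=
  match l with
  | [] => 0
  | [y] => y
  | y1 :: y2 :: t =>
    let k := (y1 :: y2 :: t).length / 2
    ec_value ((y1 :: y2 :: t).take k) + (ec_value ((y1 :: y2 :: t).drop k)) <<< k
termination_by l.length
decreasing_by
  · simp [List.length_take]; omega
  · simp [List.length_drop]; omega

def extract_classifications_alt (output_concat_phrases : List (List (String × List Int))) : List Int :=
  output_concat_phrases.map
    (fun phrase => ec_value ((((PySem.Dict.mk phrase).get? "classifications").getD [])))

-- ===== PRECONDITION & SPEC =====
-- Pre_ excludes exactly the inputs where Python A raises KeyError: a phrase dict without the key 'classifications'.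
def Pre_extract_classifications (output_concat_phrases : List (List (String × List Int))) : Prop :=
  (output_concat_phrases.all (fun phrase => (PySem.Dict.mk phrase).contains "classifications")) = true
instance (output_concat_phrases : List (List (String × List Int))) : Decidable (Pre_extract_classifications output_concat_phrases) := by unfold Pre_extract_classifications; infer_instance

def pvWitness_extract_classifications : (List (List (String × List Int))) :=
  [[("classifications", [1, 0, 1])], [("classifications", [])]]

def Spec_extract_classifications (output_concat_phrases : List (List (String × List Int))) (out : List Int) : Prop := out = extract_classifications_alt output_concat_phrases
instance (output_concat_phrases : List (List (String × List Int))) (out : List Int) : Decidable (Spec_extract_classifications output_concat_phrases out) := by unfold Spec_extract_classifications; infer_instance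

-- ===== CLAIM (what is proved, stated in full; the proofs are below) =====
def Claim_equal_extract_classifications : Prop := ∀ (output_concat_phrases : List (List (String × List Int))), Dom_extract_classifications output_concat_phrases → Pre_extract_classifications output_concat_phrases → Spec_extract_classifications output_concat_phrases (extract_classifications output_concat_phrases)

-- ===== LEMMAS AND PROOFS =====

-- The little-endian value as a foldr (reference form both ports are reduced to).
def ec_L (l : List Int) : Int := l.foldr (fun y a => a * 2 + y) 0

-- A's accumulate-append loop is a map.
theorem ec_foldl_append_map (ps : List (List (String × List Int))) (f : List (String × List Int) → Int)
    (acc : List Int) :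
    ps.foldl (fun r p => r ++ [f p]) acc = acc ++ ps.map f := by
  induction ps generalizing acc with
  | nil => simp
  | cons p t ih => simp [ih]

-- A's inner enumerate-shift sum, generalized over start index and accumulator.
theorem ec_enum_shift (l : List Int) (n : Nat) (s : Int) :
    (PySem.List.enumerate l (n : Int)).foldl (fun s p => s + (p.2 <<< p.1.toNat)) s
      = s + ec_L l * 2 ^ n := by
  induction l generalizing n s with
  | nil => simp [PySem.List.enumerate, ec_L]
  | cons y t ih =>
    rw [PySem.List.enumerate_cons]
    simp only [List.foldl_cons]
    have h1 : ((n : Int) + 1) = ((n + 1 : Nat) : Int) := by push_cast; ring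
    rw [h1, ih]
    have h2 : ((n : Int)).toNat = n := Int.toNat_natCast n
    rw [h2, Int.shiftLeft_eq]
    simp only [ec_L, List.foldr_cons]
    ring

-- The value splits additively at any cut.
theorem ec_L_append (a b : List Int) :
    ec_L (a ++ b) = ec_L a + ec_L b * 2 ^ a.length := by
  induction a with
  | nil => simp [ec_L]
  | cons y t ih =>
    simp only [List.cons_append, ec_L, List.foldr_cons] at *
    rw [ih]
    simp [List.length_cons]
    ring

-- B's divide-and-conquer valuation computes the little-endian value.
theorem ec_value_eq (l : List Int) : ec_value l = ec_L l := by
  induction l using ec_value.induct with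
  | case1 => simp [ec_value, ec_L]
  | case2 y => simp [ec_value, ec_L]
  | case3 y1 y2 t k ih1 ih2 =>
    rw [ec_value]
    show ec_value ((y1 :: y2 :: t).take k) + (ec_value ((y1 :: y2 :: t).drop k)) <<< k
        = ec_L (y1 :: y2 :: t)
    rw [ih1, ih2, Int.shiftLeft_eq]
    have h := ec_L_append ((y1 :: y2 :: t).take k) ((y1 :: y2 :: t).drop k)
    rw [List.take_append_drop] at h
    have hk : ((y1 :: y2 :: t).take k).length = k := by
      rw [List.length_take]; exact Nat.min_eq_left (Nat.div_le_self _ _)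
    rw [hk] at h
    rw [h]

-- ===== VERDICT (by name: the statement is the Claim_ definition above) =====
theorem extract_classifications_spec : Claim_equal_extract_classifications := by
  intro ps _ _
  unfold Spec_extract_classifications extract_classifications extract_classifications_alt
  rw [ec_foldl_append_map]
  simp only [List.nil_append]
  apply List.map_congr_left
  intro phrase _
  have := ec_enum_shift (((PySem.Dict.mk phrase).get? "classifications").getD []) 0 0
  simp only [Nat.cast_zero, pow_zero, mul_one, zero_add] at this
  rw [this, ec_value_eq]
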